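-- pv_equiv track=rewrite | github.com/Lizaterdag/kr-argumentation | Semantics_looped.py | get_grounded_extensions
-- ===== SOURCE A (Python) =====
-- def get_grounded_extensions(dictionaries):
--     min_in_value = min_out_value = float('inf')
--     result_min_in = result_min_out = []
--
--     for d in dictionaries:
--         if all(str(value) == "UNDECIDED" for value in d.values()):
--             continue
--         count_in = sum(1 for value in d.values() if value == 'IN')
--         count_out = sum(1 for value in d.values() if value == 'OUT')
--
--         if count_in < min_in_value:
--             min_in_value, result_min_in = count_in, [d]
--         elif count_in == min_in_value:
--             result_min_in.append(d)
--
--         if count_out < min_out_value: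
--             min_out_value, result_min_out = count_out, [d]
--         elif count_out == min_out_value:
--             result_min_out.append(d)
--
--     return result_min_in + result_min_out
-- ===== SOURCE B (Python) =====
-- def get_grounded_extensions(dictionaries):
--     # Two-pass: collect (dict, in-count, out-count) triples, then filter by global minima.
--     triples = []
--     for d in dictionaries:
--         vals = list(d.values())
--         if any(v != "UNDECIDED" for v in vals):
--             triples.append((d,
--                             sum(v == 'IN' for v in vals),
--                             sum(v == 'OUT' for v in vals)))
--     if not triples:
--         return []
--     min_in = min(c for _, c, _ in triples)
--     min_out = min(c for _, _, c in triples)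
--     return [d for d, c, _ in triples if c == min_in] + \
--            [d for d, _, c in triples if c == min_out]
-- ===== Notes on version B (the rewrite author's own statement) =====
-- stated objective: alternative
-- what changed: Replaces A's single pass maintaining running minima and incrementally rebuilt result lists with a two-pass decomposition: first collect (dict, in-count, out-count) triples for the qualifying dicts, then compute the two global minima and filter the triples by them.
import Mathlib
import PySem

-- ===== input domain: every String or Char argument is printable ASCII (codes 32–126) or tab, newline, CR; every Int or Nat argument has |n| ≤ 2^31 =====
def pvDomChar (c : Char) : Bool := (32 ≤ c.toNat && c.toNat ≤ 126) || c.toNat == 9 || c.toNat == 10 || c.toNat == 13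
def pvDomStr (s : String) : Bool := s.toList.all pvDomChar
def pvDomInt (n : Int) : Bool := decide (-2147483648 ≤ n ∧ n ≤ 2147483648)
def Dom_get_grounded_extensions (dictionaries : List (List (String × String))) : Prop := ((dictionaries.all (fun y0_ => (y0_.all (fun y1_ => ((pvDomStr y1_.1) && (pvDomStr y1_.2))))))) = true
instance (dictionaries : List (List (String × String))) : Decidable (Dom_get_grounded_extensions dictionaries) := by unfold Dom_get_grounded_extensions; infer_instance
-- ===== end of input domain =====

-- B replaces A's single running-minimum loop by a two-pass decomposition
-- (collect (dict, in-count, out-count) triples, then filter by the global minima);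
-- objective: alternative/simpler, no speed claim.

-- ===== PORT A =====
-- values of a Python dict given as an association list (insertion order, last value per key)
def pvVals (d : List (String × String)) : List String := (PySem.Dict.ofList d).values

-- A's running-minimum update: 'if c < m: m, r = c, [d]; elif c == m: r.append(d)' (m = none is float('inf'))
def pvUpd {α : Type} (st : Option Nat × List α) (c : Nat) (d : α) : Option Nat × List α :=
  match st with
  | (none, _) => (some c, [d])
  | (some m, r) =>
    if c < m then (some c, [d]) else if c = m then (some m, r ++ [d]) else (some m, r)

def get_grounded_extensions (dictionaries : List (List (String × String))) : List (List (String × String)) :=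
  let st := dictionaries.foldl
    (fun st d =>
      if (pvVals d).all (fun v => v == "UNDECIDED") then st
      else
        let count_in := (pvVals d).countP (fun v => v == "IN")
        let count_out := (pvVals d).countP (fun v => v == "OUT")
        (pvUpd st.1 count_in d, pvUpd st.2 count_out d))
    ((none, []), (none, []))
  st.1.2 ++ st.2.2

-- ===== PORT B =====
def get_grounded_extensions_alt (dictionaries : List (List (String × String))) : List (List (String × String)) :=
  let triples := dictionaries.filterMap (fun d =>
    let vals := pvVals d
    if vals.any (fun v => v != "UNDECIDED") then
      some (d, vals.countP (fun v => v == "IN"), vals.countP (fun v => v == "OUT"))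
    else none)
  match PySem.List.min? (triples.map (fun t => t.2.1)) (fun x => x),
        PySem.List.min? (triples.map (fun t => t.2.2)) (fun x => x) with
  | some min_in, some min_out =>
      (triples.filter (fun t => t.2.1 == min_in)).map (fun t => t.1)
        ++ (triples.filter (fun t => t.2.2 == min_out)).map (fun t => t.1)
  | _, _ => []

-- ===== PRECONDITION & SPEC =====
def Spec_get_grounded_extensions (dictionaries : List (List (String × String))) (out : List (List (String × String))) : Prop := out = get_grounded_extensions_alt dictionaries
instance (dictionaries : List (List (String × String))) (out : List (List (String × String))) : Decidable (Spec_get_grounded_extensions dictionaries out) := by unfold Spec_get_grounded_extensions; infer_instance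

-- ===== CLAIM (what is proved, stated in full; the proofs are below) =====
def Claim_equal_get_grounded_extensions : Prop := ∀ (dictionaries : List (List (String × String))), Dom_get_grounded_extensions dictionaries → Spec_get_grounded_extensions dictionaries (get_grounded_extensions dictionaries)

-- ===== LEMMAS AND PROOFS =====

-- B's "filter by the global minimum" result, on (element, count) pairs
def pvColl {α : Type} (ps : List (α × Nat)) : List α :=
  match PySem.List.min? (ps.map Prod.snd) (fun x => x) with
  | none => []
  | some m => (ps.filter (fun p => p.2 == m)).map Prod.fst

lemma pvMin?_append_singleton (l : List Nat) (c : Nat) :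
    PySem.List.min? (l ++ [c]) (fun x => x)
      = some (match PySem.List.min? l (fun x => x) with | none => c | some m => min m c) := by
  cases l with
  | nil => rfl
  | cons x t =>
    rw [List.cons_append, PySem.List.min?_id_cons, PySem.List.min?_id_cons, List.foldl_append]
    simp

lemma pvFold_eq {α : Type} (ps : List (α × Nat)) :
    ps.foldl (fun st p => pvUpd st p.2 p.1) (none, [])
      = (PySem.List.min? (ps.map Prod.snd) (fun x => x), pvColl ps) := by
  induction ps using List.reverseRecOn with
  | nil => rfl
  | append_singleton ps p ih =>
    rw [List.foldl_append, ih, List.foldl_cons, List.foldl_nil]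
    simp only [List.map_append, List.map_cons, List.map_nil]
    rw [pvMin?_append_singleton]
    cases h : PySem.List.min? (ps.map Prod.snd) (fun x => x) with
    | none =>
      have hps : ps = [] := (List.map_eq_nil_iff).1 ((PySem.List.min?_eq_none_iff _ _).1 h)
      subst hps
      simp [pvUpd, pvColl, PySem.List.min?_id_cons]
    | some m =>
      have hmin : ∀ q ∈ ps, m ≤ q.2 := by
        intro q hq
        exact PySem.List.min?_isMin h q.2 (List.mem_map_of_mem hq)
      unfold pvColl
      simp only [List.map_append, List.map_cons, List.map_nil]
      rw [pvMin?_append_singleton, h]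
      simp only [pvUpd]
      by_cases hlt : p.2 < m
      · have hmm : min m p.2 = p.2 := by omega
        rw [if_pos hlt, hmm]
        have hnil : ps.filter (fun q => q.2 == p.2) = [] := by
          apply List.filter_eq_nil_iff.2
          intro q hq
          have := hmin q hq
          simp only [beq_iff_eq]
          omega
        simp [List.filter_append, hnil]
      · rw [if_neg hlt]
        by_cases heq : p.2 = m
        · have hmm : min m p.2 = m := by omega
          rw [if_pos heq, hmm]
          simp [List.filter_append, heq]
        · have hmm : min m p.2 = m := by omega
          rw [if_neg heq, hmm]
          have hfa : (p.2 == m) = false := by simp [heq]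
          simp [List.filter_append, hfa]

-- the two skip conditions agree: any(v != U) = not all(v == U)
lemma pvKeep_eq (vals : List String) :
    (vals.any (fun v => v != "UNDECIDED")) = !(vals.all (fun v => v == "UNDECIDED")) := by
  rw [List.not_all_eq_any_not]
  simp [bne]

-- B's triples are A's qualifying dicts paired with their counts
lemma pvTriples_eq (dictionaries : List (List (String × String))) :
    dictionaries.filterMap (fun d =>
        let vals := pvVals d
        if vals.any (fun v => v != "UNDECIDED") then
          some (d, vals.countP (fun v => v == "IN"), vals.countP (fun v => v == "OUT"))
        else none)
      = (dictionaries.filter (fun d => !(pvVals d).all (fun v => v == "UNDECIDED"))).map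
          (fun d => (d, (pvVals d).countP (fun v => v == "IN"), (pvVals d).countP (fun v => v == "OUT"))) := by
  induction dictionaries with
  | nil => rfl
  | cons d t ih =>
    simp only [List.filterMap_cons, List.filter_cons, pvKeep_eq]
    simp only [pvKeep_eq] at ih
    by_cases h : ((pvVals d).all (fun v => v == "UNDECIDED")) = true
    · rw [if_neg (by simp [h]), if_neg (by simp [h])]
      exact ih
    · rw [if_pos (by simp [h]), if_pos (by simp [h]), List.map_cons, ih]

-- the fold over qualifying dicts with one count function, written as B computes it
lemma pvSide {α : Type} [DecidableEq α] (F : List α) (c : α → Nat) :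
    F.foldl (fun st d => pvUpd st (c d) d) (none, [])
      = ((PySem.List.min? (F.map c) (fun x => x)),
         match PySem.List.min? (F.map c) (fun x => x) with
         | none => []
         | some m => F.filter (fun d => c d == m)) := by
  have h := pvFold_eq (F.map (fun d => (d, c d)))
  rw [List.foldl_map] at h
  rw [h]
  unfold pvColl
  rw [List.map_map]
  have hm : (Prod.snd ∘ fun d : α => (d, c d)) = c := rfl
  rw [hm]
  cases hmv : PySem.List.min? (F.map c) (fun x => x) with
  | none => rfl
  | some m =>
    simp only []
    rw [List.filter_map, List.map_map]
    have hid : (Prod.fst ∘ fun d : α => (d, c d)) = id := rfl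
    rw [hid, List.map_id]
    rfl

theorem get_grounded_extensions_spec : Claim_equal_get_grounded_extensions := by
  intro dictionaries _
  unfold Spec_get_grounded_extensions get_grounded_extensions get_grounded_extensions_alt
  rw [pvTriples_eq]
  simp only []
  have hA : dictionaries.foldl
      (fun st d =>
        if (pvVals d).all (fun v => v == "UNDECIDED") then st
        else
          (pvUpd st.1 ((pvVals d).countP (fun v => v == "IN")) d,
           pvUpd st.2 ((pvVals d).countP (fun v => v == "OUT")) d))
      ((none, []), (none, []))
      = ((dictionaries.filter (fun d => !(pvVals d).all (fun v => v == "UNDECIDED"))).foldl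
           (fun st d => pvUpd st ((pvVals d).countP (fun v => v == "IN")) d) (none, []),
         (dictionaries.filter (fun d => !(pvVals d).all (fun v => v == "UNDECIDED"))).foldl
           (fun st d => pvUpd st ((pvVals d).countP (fun v => v == "OUT")) d) (none, [])) := by
    rw [← PySem.List.foldl_prod_mk
        (fun st d => pvUpd st ((pvVals d).countP (fun v => v == "IN")) d)
        (fun st d => pvUpd st ((pvVals d).countP (fun v => v == "OUT")) d),
      List.foldl_filter]
    congr 1
    funext st d
    cases h : (pvVals d).all (fun v => v == "UNDECIDED") <;> simp
  rw [hA, pvSide, pvSide]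
  cases h1 : PySem.List.min?
      ((dictionaries.filter (fun d => !(pvVals d).all (fun v => v == "UNDECIDED"))).map
        (fun d => (pvVals d).countP (fun v => v == "IN"))) (fun x => x) with
  | none =>
    have hFnil : dictionaries.filter (fun d => !(pvVals d).all (fun v => v == "UNDECIDED")) = [] :=
      (List.map_eq_nil_iff).1 ((PySem.List.min?_eq_none_iff _ _).1 h1)
    simp [hFnil, PySem.List.min?]
  | some mi =>
    rw [List.map_map]
    have hc1 : ((fun t : List (String × String) × Nat × Nat => t.2.1) ∘
        fun d => (d, (pvVals d).countP (fun v => v == "IN"), (pvVals d).countP (fun v => v == "OUT")))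
        = fun d => (pvVals d).countP (fun v => v == "IN") := rfl
    rw [hc1, h1]
    cases h2 : PySem.List.min?
        ((dictionaries.filter (fun d => !(pvVals d).all (fun v => v == "UNDECIDED"))).map
          (fun d => (pvVals d).countP (fun v => v == "OUT"))) (fun x => x) with
    | none =>
      exfalso
      have hFnil : dictionaries.filter (fun d => !(pvVals d).all (fun v => v == "UNDECIDED")) = [] :=
        (List.map_eq_nil_iff).1 ((PySem.List.min?_eq_none_iff _ _).1 h2)
      rw [hFnil] at h1
      simp [PySem.List.min?] at h1
    | some mo =>
      rw [List.map_map]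
      have hc2 : ((fun t : List (String × String) × Nat × Nat => t.2.2) ∘
          fun d => (d, (pvVals d).countP (fun v => v == "IN"), (pvVals d).countP (fun v => v == "OUT")))
          = fun d => (pvVals d).countP (fun v => v == "OUT") := rfl
      rw [hc2, h2]
      simp only []
      rw [List.filter_map, List.filter_map, List.map_map, List.map_map]
      have hid : ((fun t : List (String × String) × Nat × Nat => t.1) ∘
          fun d => (d, (pvVals d).countP (fun v => v == "IN"), (pvVals d).countP (fun v => v == "OUT")))
          = id := rfl
      rw [hid, List.map_id, List.map_id]
      rfl
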